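-- pv_equiv track=rewrite | github.com/Skywalker427/jira-conventional-commit | jira-conventional-commit.py | get_conventional_commit_type
-- ===== SOURCE A (Python) =====
-- def get_conventional_commit_type(commit_arg):
--     conventional_commits = {
--        'feat': ['f', 'feat', 'feature', 'ft'],
--         'fix': ['fx', 'fix'],
--         'docs': ['d', 'docs'],
--         'style': ['s', 'style', 'st'],
--         'refactor': ['r', 'refactor', 'ref'],
--         'test': ['t', 'test'],
--         'chore': ['c', 'chore'],
--         'perf': ['p', 'perf'],
--         'ci': ['ci'],
--         'build': ['b', 'build', 'bld', 'bl', 'bd'],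
--         'revert': ['rev', 'revert'],
--         'wip': ['wip'],
--         'release': ['rl', 'release'],
--         'hotfix': ['hf', 'hfx', 'hotfix'],
--         'merge': ['m', 'merge'],
--         'squash': ['sq', 'squash'],
--     }
--     for commit_type, aliases in conventional_commits.items():
--         if commit_arg in aliases:
--             return commit_type
--     return 'chore'
-- ===== SOURCE B (Python) =====
-- _ALIAS_TO_TYPE = {
--     'f': 'feat', 'feat': 'feat', 'feature': 'feat', 'ft': 'feat',
--     'fx': 'fix', 'fix': 'fix',
--     'd': 'docs', 'docs': 'docs',
--     's': 'style', 'style': 'style', 'st': 'style',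
--     'r': 'refactor', 'refactor': 'refactor', 'ref': 'refactor',
--     't': 'test', 'test': 'test',
--     'c': 'chore', 'chore': 'chore',
--     'p': 'perf', 'perf': 'perf',
--     'ci': 'ci',
--     'b': 'build', 'build': 'build', 'bld': 'build', 'bl': 'build', 'bd': 'build',
--     'rev': 'revert', 'revert': 'revert',
--     'wip': 'wip',
--     'rl': 'release', 'release': 'release',
--     'hf': 'hotfix', 'hfx': 'hotfix', 'hotfix': 'hotfix',
--     'm': 'merge', 'merge': 'merge',
--     'sq': 'squash', 'squash': 'squash',
-- }
--
-- def get_conventional_commit_type(commit_arg):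
--     return _ALIAS_TO_TYPE.get(commit_arg, 'chore')
-- ===== Notes on version B (the rewrite author's own statement) =====
-- stated objective: idiomatic
-- what changed: Replaced the loop over type groups with a per-group list membership test by a single flat alias-to-type dictionary built once and one keyed lookup with default 'chore'.
import Mathlib
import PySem

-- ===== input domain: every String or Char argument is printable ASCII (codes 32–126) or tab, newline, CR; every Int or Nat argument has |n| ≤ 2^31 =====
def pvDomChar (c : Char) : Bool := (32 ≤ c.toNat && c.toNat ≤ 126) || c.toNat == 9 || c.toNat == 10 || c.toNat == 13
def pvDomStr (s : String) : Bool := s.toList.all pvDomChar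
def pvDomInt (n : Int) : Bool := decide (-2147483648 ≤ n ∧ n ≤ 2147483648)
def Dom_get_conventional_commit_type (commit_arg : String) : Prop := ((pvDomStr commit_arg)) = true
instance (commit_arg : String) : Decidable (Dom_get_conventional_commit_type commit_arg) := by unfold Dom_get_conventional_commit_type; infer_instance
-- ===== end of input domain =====

-- B replaces A's loop over type groups (with a list membership test per group) by one
-- precomputed flat alias→type dictionary and a single .get with default 'chore' (more idiomatic).

-- ===== PORT A =====
-- the dict literal of A, in insertion order; the for-loop with early return is pvLoopA
def pvConventionalCommits : List (String × List String) :=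
  [ ("feat", ["f", "feat", "feature", "ft"]),
    ("fix", ["fx", "fix"]),
    ("docs", ["d", "docs"]),
    ("style", ["s", "style", "st"]),
    ("refactor", ["r", "refactor", "ref"]),
    ("test", ["t", "test"]),
    ("chore", ["c", "chore"]),
    ("perf", ["p", "perf"]),
    ("ci", ["ci"]),
    ("build", ["b", "build", "bld", "bl", "bd"]),
    ("revert", ["rev", "revert"]),
    ("wip", ["wip"]),
    ("release", ["rl", "release"]),
    ("hotfix", ["hf", "hfx", "hotfix"]),
    ("merge", ["m", "merge"]),
    ("squash", ["sq", "squash"]) ]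

def pvLoopA (commit_arg : String) : List (String × List String) → String
  | [] => "chore"
  | (commit_type, aliases) :: rest =>
      if commit_arg ∈ aliases then commit_type else pvLoopA commit_arg rest

def get_conventional_commit_type (commit_arg : String) : String :=
  pvLoopA commit_arg pvConventionalCommits

-- ===== PORT B =====
-- B's module-level flat dict _ALIAS_TO_TYPE
def pvAliasToType : PySem.Dict String String := PySem.Dict.ofList
  [ ("f", "feat"), ("feat", "feat"), ("feature", "feat"), ("ft", "feat"),
    ("fx", "fix"), ("fix", "fix"),
    ("d", "docs"), ("docs", "docs"),
    ("s", "style"), ("style", "style"), ("st", "style"),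
    ("r", "refactor"), ("refactor", "refactor"), ("ref", "refactor"),
    ("t", "test"), ("test", "test"),
    ("c", "chore"), ("chore", "chore"),
    ("p", "perf"), ("perf", "perf"),
    ("ci", "ci"),
    ("b", "build"), ("build", "build"), ("bld", "build"), ("bl", "build"), ("bd", "build"),
    ("rev", "revert"), ("revert", "revert"),
    ("wip", "wip"),
    ("rl", "release"), ("release", "release"),
    ("hf", "hotfix"), ("hfx", "hotfix"), ("hotfix", "hotfix"),
    ("m", "merge"), ("merge", "merge"),
    ("sq", "squash"), ("squash", "squash") ]

def get_conventional_commit_type_alt (commit_arg : String) : String :=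
  PySem.Dict.getD pvAliasToType commit_arg "chore"

-- ===== PRECONDITION & SPEC =====
def Spec_get_conventional_commit_type (commit_arg : String) (out : String) : Prop := out = get_conventional_commit_type_alt commit_arg
instance (commit_arg : String) (out : String) : Decidable (Spec_get_conventional_commit_type commit_arg out) := by unfold Spec_get_conventional_commit_type; infer_instance

-- ===== CLAIM (what is proved, stated in full; the proofs are below) =====
def Claim_equal_get_conventional_commit_type : Prop := ∀ (commit_arg : String), Dom_get_conventional_commit_type commit_arg → Spec_get_conventional_commit_type commit_arg (get_conventional_commit_type commit_arg)

-- ===== LEMMAS AND PROOFS =====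

-- ===== VERDICT (by name: the statement is the Claim_ definition above) =====
set_option maxRecDepth 16384 in
set_option maxHeartbeats 1600000 in
theorem get_conventional_commit_type_spec : Claim_equal_get_conventional_commit_type := by
  intro s _
  unfold Spec_get_conventional_commit_type get_conventional_commit_type get_conventional_commit_type_alt
  by_cases h : s ∈ (["f", "feat", "feature", "ft", "fx", "fix", "d", "docs", "s", "style", "st", "r", "refactor", "ref", "t", "test", "c", "chore", "p", "perf", "ci", "b", "build", "bld", "bl", "bd", "rev", "revert", "wip", "rl", "release", "hf", "hfx", "hotfix", "m", "merge", "sq", "squash"] : List String)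
  · simp only [List.mem_cons, List.not_mem_nil, or_false] at h
    rcases h with rfl|rfl|rfl|rfl|rfl|rfl|rfl|rfl|rfl|rfl|rfl|rfl|rfl|rfl|rfl|rfl|rfl|rfl|rfl|rfl|rfl|rfl|rfl|rfl|rfl|rfl|rfl|rfl|rfl|rfl|rfl|rfl|rfl|rfl|rfl|rfl|rfl|rfl <;> decide
  · simp only [List.mem_cons, List.not_mem_nil, or_false, not_or] at h
    obtain ⟨h1, h2, h3, h4, h5, h6, h7, h8, h9, h10, h11, h12, h13, h14, h15, h16, h17, h18, h19, h20, h21, h22, h23, h24, h25, h26, h27, h28, h29, h30, h31, h32, h33, h34, h35, h36, h37, h38⟩ := h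
    have hd : pvAliasToType = PySem.Dict.mk [("f", "feat"), ("feat", "feat"), ("feature", "feat"), ("ft", "feat"), ("fx", "fix"), ("fix", "fix"), ("d", "docs"), ("docs", "docs"), ("s", "style"), ("style", "style"), ("st", "style"), ("r", "refactor"), ("refactor", "refactor"), ("ref", "refactor"), ("t", "test"), ("test", "test"), ("c", "chore"), ("chore", "chore"), ("p", "perf"), ("perf", "perf"), ("ci", "ci"), ("b", "build"), ("build", "build"), ("bld", "build"), ("bl", "build"), ("bd", "build"), ("rev", "revert"), ("revert", "revert"), ("wip", "wip"), ("rl", "release"), ("release", "release"), ("hf", "hotfix"), ("hfx", "hotfix"), ("hotfix", "hotfix"), ("m", "merge"), ("merge", "merge"), ("sq", "squash"), ("squash", "squash")] := by decide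
    rw [hd]
    have g1 : ¬ "f" = s := fun e => h1 e.symm
    have g2 : ¬ "feat" = s := fun e => h2 e.symm
    have g3 : ¬ "feature" = s := fun e => h3 e.symm
    have g4 : ¬ "ft" = s := fun e => h4 e.symm
    have g5 : ¬ "fx" = s := fun e => h5 e.symm
    have g6 : ¬ "fix" = s := fun e => h6 e.symm
    have g7 : ¬ "d" = s := fun e => h7 e.symm
    have g8 : ¬ "docs" = s := fun e => h8 e.symm
    have g9 : ¬ "s" = s := fun e => h9 e.symm
    have g10 : ¬ "style" = s := fun e => h10 e.symm
    have g11 : ¬ "st" = s := fun e => h11 e.symm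
    have g12 : ¬ "r" = s := fun e => h12 e.symm
    have g13 : ¬ "refactor" = s := fun e => h13 e.symm
    have g14 : ¬ "ref" = s := fun e => h14 e.symm
    have g15 : ¬ "t" = s := fun e => h15 e.symm
    have g16 : ¬ "test" = s := fun e => h16 e.symm
    have g17 : ¬ "c" = s := fun e => h17 e.symm
    have g18 : ¬ "chore" = s := fun e => h18 e.symm
    have g19 : ¬ "p" = s := fun e => h19 e.symm
    have g20 : ¬ "perf" = s := fun e => h20 e.symm
    have g21 : ¬ "ci" = s := fun e => h21 e.symm
    have g22 : ¬ "b" = s := fun e => h22 e.symm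
    have g23 : ¬ "build" = s := fun e => h23 e.symm
    have g24 : ¬ "bld" = s := fun e => h24 e.symm
    have g25 : ¬ "bl" = s := fun e => h25 e.symm
    have g26 : ¬ "bd" = s := fun e => h26 e.symm
    have g27 : ¬ "rev" = s := fun e => h27 e.symm
    have g28 : ¬ "revert" = s := fun e => h28 e.symm
    have g29 : ¬ "wip" = s := fun e => h29 e.symm
    have g30 : ¬ "rl" = s := fun e => h30 e.symm
    have g31 : ¬ "release" = s := fun e => h31 e.symm
    have g32 : ¬ "hf" = s := fun e => h32 e.symm
    have g33 : ¬ "hfx" = s := fun e => h33 e.symm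
    have g34 : ¬ "hotfix" = s := fun e => h34 e.symm
    have g35 : ¬ "m" = s := fun e => h35 e.symm
    have g36 : ¬ "merge" = s := fun e => h36 e.symm
    have g37 : ¬ "sq" = s := fun e => h37 e.symm
    have g38 : ¬ "squash" = s := fun e => h38 e.symm
    simp only [pvLoopA, pvConventionalCommits, List.mem_cons, List.not_mem_nil, or_false,
      PySem.Dict.getD, PySem.Dict.get?_mk_cons]
    simp [h1, h2, h3, h4, h5, h6, h7, h8, h9, h10, h11, h12, h13, h14, h15, h16, h17, h18, h19, h20, h21, h22, h23, h24, h25, h26, h27, h28, h29, h30, h31, h32, h33, h34, h35, h36, h37, h38, g1, g2, g3, g4, g5, g6, g7, g8, g9, g10, g11, g12, g13, g14, g15, g16, g17, g18, g19, g20, g21, g22, g23, g24, g25, g26, g27, g28, g29, g30, g31, g32, g33, g34, g35, g36, g37, g38, PySem.Dict.get?]
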